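-- pv_equiv track=rewrite | github.com/alouane-mehdi/Sudoku-Solver | test6.py | est_carre_valide
-- ===== SOURCE A (Python) =====
-- def est_carre_valide(sudoku, carre_ligne, carre_colonne):
--     """
--     Vérifie si un carré 3x3 du sudoku est valide.
--     """
--     chiffres = set()
--     for ligne in range(3):
--         for colonne in range(3):
--             val = sudoku[carre_ligne * 3 + ligne][carre_colonne * 3 + colonne]
--             if val in chiffres:
--                 return False
--             if val != 0:
--                 chiffres.add(val)
--     return True
-- ===== SOURCE B (Python) =====
-- def est_carre_valide(sudoku, carre_ligne, carre_colonne):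
--     """
--     Vérifie si un carré 3x3 du sudoku est valide.
--     Brute-force pairwise comparison: no set at all — compare every pair of cells.
--     """
--     cells = [sudoku[carre_ligne * 3 + ligne][carre_colonne * 3 + colonne]
--              for ligne in range(3) for colonne in range(3)]
--     for i in range(9):
--         for j in range(i + 1, 9):
--             if cells[i] != 0 and cells[i] == cells[j]:
--                 return False
--     return True
-- ===== Notes on version B (the rewrite author's own statement) =====
-- stated objective: alternative
-- what changed: A's single-pass set-membership loop (hash set accumulator with early return per cell) is replaced by brute-force pairwise comparison: collect the 9 cells, then test all 36 index pairs i<j for an equal non-zero pair, using no set or auxiliary structure at all.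
-- outside the precondition, e.g. on est_carre_valide([[1, 1], [0, 0]], 0, 0): A returns False, B raises IndexError
import Mathlib
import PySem

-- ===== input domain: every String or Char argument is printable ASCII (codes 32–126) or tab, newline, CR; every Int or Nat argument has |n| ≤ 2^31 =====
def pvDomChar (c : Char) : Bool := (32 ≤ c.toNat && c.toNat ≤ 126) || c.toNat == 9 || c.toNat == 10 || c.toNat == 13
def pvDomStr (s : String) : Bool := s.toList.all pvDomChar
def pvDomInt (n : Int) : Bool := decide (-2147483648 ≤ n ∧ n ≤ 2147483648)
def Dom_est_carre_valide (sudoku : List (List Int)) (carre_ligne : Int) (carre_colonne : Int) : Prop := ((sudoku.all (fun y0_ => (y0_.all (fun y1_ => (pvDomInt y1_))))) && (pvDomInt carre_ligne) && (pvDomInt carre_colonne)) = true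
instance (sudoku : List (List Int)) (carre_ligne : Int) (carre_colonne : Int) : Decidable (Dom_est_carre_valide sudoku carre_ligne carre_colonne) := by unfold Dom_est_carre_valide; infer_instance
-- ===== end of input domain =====

-- B replaces A's incremental set-membership loop by brute-force pairwise comparison:
-- collect the block's 9 cells, then test all index pairs i<j for an equal non-zero pair.

-- ===== PORT A =====
-- cell access sudoku[cl*3+l][cc*3+c]; pyGetD is exact under Pre_ (both indices in range)
def pvCell (sudoku : List (List Int)) (cl cc l c : Int) : Int :=
  PySem.List.pyGetD (PySem.List.pyGetD sudoku (cl * 3 + l) []) (cc * 3 + c) 0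

def pvPairs : List (Int × Int) :=
  (PySem.List.pyRange 0 3 1).flatMap (fun l => (PySem.List.pyRange 0 3 1).map (fun c => (l, c)))

-- the nested for-loops of A, with early return False encoded as the Bool result
def pvA_go (sudoku : List (List Int)) (cl cc : Int) : List (Int × Int) → PySem.Set Int → Bool
  | [], _ => true
  | (l, c) :: rest, chiffres =>
    let val := pvCell sudoku cl cc l c
    if PySem.Set.contains chiffres val then false
    else pvA_go sudoku cl cc rest (if val ≠ 0 then PySem.Set.add chiffres val else chiffres)

def est_carre_valide (sudoku : List (List Int)) (carre_ligne : Int) (carre_colonne : Int) : Bool :=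
  pvA_go sudoku carre_ligne carre_colonne pvPairs PySem.Set.empty

-- ===== PORT B =====
-- inner loop: for j in range(i+1, 9), early return False on an equal non-zero pair
def pvB_inner (cells : List Int) (i : Int) : List Int → Bool
  | [] => true
  | j :: rest =>
    if PySem.List.pyGetD cells i 0 ≠ 0 ∧ PySem.List.pyGetD cells i 0 = PySem.List.pyGetD cells j 0
    then false else pvB_inner cells i rest

-- outer loop: for i in range(9)
def pvB_outer (cells : List Int) : List Int → Bool
  | [] => true
  | i :: rest =>
    if pvB_inner cells i (PySem.List.pyRange (i + 1) 9 1) then pvB_outer cells rest else false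

def est_carre_valide_alt (sudoku : List (List Int)) (carre_ligne : Int) (carre_colonne : Int) : Bool :=
  let cells := (PySem.List.pyRange 0 3 1).flatMap
      (fun l => (PySem.List.pyRange 0 3 1).map
        (fun c => pvCell sudoku carre_ligne carre_colonne l c))
  pvB_outer cells (PySem.List.pyRange 0 9 1)

-- ===== PRECONDITION & SPEC =====
-- Pre_ excludes the inputs on which an index among the 9 block cells is out of range:
-- there the Python programs raise IndexError (except when A meets a duplicate before the
-- bad access and returns False while B still raises — an artefact of A's early return).
def Pre_est_carre_valide (sudoku : List (List Int)) (carre_ligne : Int) (carre_colonne : Int) : Prop :=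
  ∀ l ∈ ([0, 1, 2] : List Int),
    PySem.Raise.InRange sudoku.length (carre_ligne * 3 + l) ∧
    ∀ c ∈ ([0, 1, 2] : List Int),
      PySem.Raise.InRange (PySem.List.pyGetD sudoku (carre_ligne * 3 + l) []).length (carre_colonne * 3 + c)
instance (sudoku : List (List Int)) (carre_ligne : Int) (carre_colonne : Int) : Decidable (Pre_est_carre_valide sudoku carre_ligne carre_colonne) := by unfold Pre_est_carre_valide; infer_instance

def pvWitness_est_carre_valide : List (List Int) × Int × Int :=
  ([[1, 2, 3], [4, 5, 6], [7, 8, 0]], 0, 0)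

def Spec_est_carre_valide (sudoku : List (List Int)) (carre_ligne : Int) (carre_colonne : Int) (out : Bool) : Prop := out = est_carre_valide_alt sudoku carre_ligne carre_colonne
instance (sudoku : List (List Int)) (carre_ligne : Int) (carre_colonne : Int) (out : Bool) : Decidable (Spec_est_carre_valide sudoku carre_ligne carre_colonne out) := by unfold Spec_est_carre_valide; infer_instance

-- ===== CLAIM (what is proved, stated in full; the proofs are below) =====
def Claim_equal_est_carre_valide : Prop := ∀ (sudoku : List (List Int)) (carre_ligne : Int) (carre_colonne : Int), Dom_est_carre_valide sudoku carre_ligne carre_colonne → Pre_est_carre_valide sudoku carre_ligne carre_colonne → Spec_est_carre_valide sudoku carre_ligne carre_colonne (est_carre_valide sudoku carre_ligne carre_colonne)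

-- ===== LEMMAS AND PROOFS =====

-- A's loop over the cell values, with 0 ∉ chiffres: returns true iff the non-zero values
-- are pairwise distinct and fresh w.r.t. chiffres
lemma pvA_go_eq (sudoku : List (List Int)) (cl cc : Int) (ps : List (Int × Int))
    (ch : PySem.Set Int) (h0 : (0 : Int) ∉ ch) :
    pvA_go sudoku cl cc ps ch = true ↔
      (((ps.map (fun p => pvCell sudoku cl cc p.1 p.2)).filter (fun v => (v ≠ 0 : Bool))).Nodup ∧
        ∀ v ∈ (ps.map (fun p => pvCell sudoku cl cc p.1 p.2)).filter (fun v => (v ≠ 0 : Bool)), v ∉ ch) := by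
  induction ps generalizing ch with
  | nil => simp [pvA_go]
  | cons p rest ih =>
    obtain ⟨l, c⟩ := p
    simp only [pvA_go, List.map_cons]
    generalize pvCell sudoku cl cc l c = val
    by_cases hmem : val ∈ ch
    · have hv0 : val ≠ 0 := fun h => h0 (h ▸ hmem)
      have hcon : PySem.Set.contains ch val = true := (PySem.Set.contains_iff _ _).2 hmem
      simp [hv0, hmem]
    · have hcon : PySem.Set.contains ch val = false := by
        by_cases h : PySem.Set.contains ch val = true
        · exact absurd ((PySem.Set.contains_iff _ _).1 h) hmem
        · simpa using h
      by_cases hv0 : val = 0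
      · subst hv0
        simp [ih ch h0, hmem]
      · have h0' : (0 : Int) ∉ PySem.Set.add ch val := by
          simp only [PySem.Set.mem_add]
          intro h
          rcases h with h | h
          exacts [h0 h, hv0 h.symm]
        have hfc : List.filter (fun v => decide (v ≠ 0))
            (val :: List.map (fun p => pvCell sudoku cl cc p.1 p.2) rest) =
            val :: List.filter (fun v => decide (v ≠ 0))
              (List.map (fun p => pvCell sudoku cl cc p.1 p.2) rest) := by
          simp [hv0]
        simp only [hcon, Bool.false_eq_true, if_false, ne_eq, hv0, not_false_eq_true, if_true,
          ih _ h0', hfc, List.nodup_cons, List.forall_mem_cons, PySem.Set.mem_add]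
        constructor
        · rintro ⟨hnd, hall⟩
          exact ⟨⟨fun hvin => (hall val hvin) (Or.inr rfl), hnd⟩, hmem,
            fun v hv hc => (hall v hv) (Or.inl hc)⟩
        · rintro ⟨⟨hvnin, hnd⟩, -, hall⟩
          exact ⟨hnd, fun v hv h => h.elim (hall v hv) (fun he => hvnin (he ▸ hv))⟩

-- Nodup of the non-zero filter is the pairwise condition "equal later entry forces zero"
lemma pv_filter_nodup_iff (xs : List Int) :
    (xs.filter (fun v => (v ≠ 0 : Bool))).Nodup ↔
      xs.Pairwise (fun a b => a ≠ 0 → a ≠ b) := by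
  induction xs with
  | nil => simp
  | cons v rest ih =>
    by_cases hv : v = 0
    · subst hv
      have hf : List.filter (fun v => decide (v ≠ 0)) ((0 : Int) :: rest) =
          List.filter (fun v => decide (v ≠ 0)) rest := by simp
      rw [hf, ih, List.pairwise_cons]
      simp
    · have hf : List.filter (fun v => decide (v ≠ 0)) (v :: rest) =
          v :: List.filter (fun v => decide (v ≠ 0)) rest := by simp [hv]
      rw [hf, List.nodup_cons, List.pairwise_cons, ih]
      constructor
      · rintro ⟨hnin, hpw⟩
        refine ⟨?_, hpw⟩
        intro b hb hv0 hvb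
        exact hnin (List.mem_filter.mpr ⟨hvb ▸ hb, by simp [hv]⟩)
      · rintro ⟨hall, hpw⟩
        refine ⟨?_, hpw⟩
        intro hvin
        rcases List.mem_filter.mp hvin with ⟨hvr, -⟩
        exact hall v hvr hv rfl

-- B's inner loop returns true iff no j in js pairs up with cell i
lemma pvB_inner_iff (cells : List Int) (i : Int) (js : List Int) :
    pvB_inner cells i js = true ↔
      ∀ j ∈ js, ¬(PySem.List.pyGetD cells i 0 ≠ 0 ∧
        PySem.List.pyGetD cells i 0 = PySem.List.pyGetD cells j 0) := by
  induction js with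
  | nil => simp [pvB_inner]
  | cons j rest ih =>
    by_cases hc : PySem.List.pyGetD cells i 0 ≠ 0 ∧
        PySem.List.pyGetD cells i 0 = PySem.List.pyGetD cells j 0
    · rw [pvB_inner, if_pos hc]
      simp only [Bool.false_eq_true, false_iff]
      intro hall
      exact hall j List.mem_cons_self hc
    · simp only [pvB_inner, if_neg hc, ih, List.forall_mem_cons]
      tauto

-- B's outer loop returns true iff every inner loop does
lemma pvB_outer_iff (cells : List Int) (is : List Int) :
    pvB_outer cells is = true ↔
      ∀ i ∈ is, pvB_inner cells i (PySem.List.pyRange (i + 1) 9 1) = true := by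
  induction is with
  | nil => simp [pvB_outer]
  | cons i rest ih =>
    by_cases hc : pvB_inner cells i (PySem.List.pyRange (i + 1) 9 1) = true
    · simp [pvB_outer, hc, ih]
    · simp [pvB_outer, hc]

-- the pairwise scan over indices 0..8 is the Pairwise predicate on a 9-element list
lemma pvB_iff (cells : List Int) (hlen : cells.length = 9) :
    pvB_outer cells (PySem.List.pyRange 0 9 1) = true ↔
      cells.Pairwise (fun a b => a ≠ 0 → a ≠ b) := by
  rw [pvB_outer_iff]
  constructor
  · intro H
    rw [List.pairwise_iff_getElem]
    intro m n hm hn hmn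
    have hn9 : n < 9 := by omega
    have hi : (m : Int) ∈ PySem.List.pyRange 0 9 1 := by
      rw [PySem.List.mem_pyRange_one]
      exact ⟨by positivity, by exact_mod_cast by omega⟩
    have hj := (pvB_inner_iff cells m _).mp (H _ hi) (n : Int)
      (by rw [PySem.List.mem_pyRange_one]; exact ⟨by exact_mod_cast by omega, by exact_mod_cast hn9⟩)
    rw [PySem.List.pyGetD_eq_getElem (i := (m : Int)) cells 0 (by positivity)
          (by rw [hlen]; exact_mod_cast by omega),
        PySem.List.pyGetD_eq_getElem (i := (n : Int)) cells 0 (by positivity)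
          (by rw [hlen]; exact_mod_cast hn9)] at hj
    simp only [Int.toNat_natCast] at hj
    intro h0 heq
    exact hj ⟨h0, heq⟩
  · intro hpw i hi
    rw [pvB_inner_iff]
    intro j hj
    rw [PySem.List.mem_pyRange_one] at hi hj
    rintro ⟨h0, heq⟩
    have hg := List.pairwise_iff_getElem.mp hpw i.toNat j.toNat
      (by omega) (by omega) (by omega)
    rw [PySem.List.pyGetD_eq_getElem (i := i) cells 0 (by omega)
          (by rw [hlen]; push_cast; omega)] at h0 heq
    rw [PySem.List.pyGetD_eq_getElem (i := j) cells 0 (by omega)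
          (by rw [hlen]; push_cast; omega)] at heq
    exact hg h0 heq

-- ===== VERDICT (by name: the statement is the Claim_ definition above) =====
theorem est_carre_valide_spec : Claim_equal_est_carre_valide := by
  intro sudoku cl cc _ _
  unfold Spec_est_carre_valide est_carre_valide est_carre_valide_alt
  rw [Bool.eq_iff_iff]
  rw [pvA_go_eq sudoku cl cc pvPairs PySem.Set.empty (by simp [PySem.Set.empty])]
  simp only [PySem.Set.empty, List.not_mem_nil, not_false_eq_true, implies_true, and_true]
  rw [pv_filter_nodup_iff]
  have hr3 : PySem.List.pyRange 0 3 1 = [0, 1, 2] := by decide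
  have hcells : pvPairs.map (fun p => pvCell sudoku cl cc p.1 p.2) =
      (PySem.List.pyRange 0 3 1).flatMap
        (fun l => (PySem.List.pyRange 0 3 1).map (fun c => pvCell sudoku cl cc l c)) := by
    simp [pvPairs, List.map_flatMap, List.map_map, Function.comp_def]
  have hlen : ((PySem.List.pyRange 0 3 1).flatMap
      (fun l => (PySem.List.pyRange 0 3 1).map (fun c => pvCell sudoku cl cc l c))).length = 9 := by
    simp [hr3]
  rw [pvB_iff _ hlen, hcells]
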